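-- pv_equiv track=rewrite | github.com/sueszli/vector-database-benchmark | dataset/python-mutated/textio.py | _is_self_overlapping
-- ===== SOURCE A (Python) =====
-- def _is_self_overlapping(delimiter):
--     if False:
--         while True:
--             i = 10
--     for i in range(1, len(delimiter)):
--         if delimiter[0:i] == delimiter[len(delimiter) - i:]:
--             return True
--     return False
-- ===== SOURCE B (Python) =====
-- def _is_self_overlapping(delimiter):
--     # KMP prefix function: a proper prefix equals an equal-length suffix
--     # iff the failure value at the last position is positive.
--     n = len(delimiter)
--     pi = [0] * n
--     k = 0
--     for i in range(1, n):
--         while k > 0 and delimiter[i] != delimiter[k]: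
--             k = pi[k - 1]
--         if delimiter[i] == delimiter[k]:
--             k += 1
--         pi[i] = k
--     return k > 0
-- ===== Notes on version B (the rewrite author's own statement) =====
-- stated objective: faster
-- what changed: B replaces A's loop that compares every length-i prefix slice with the equal-length suffix slice by the KMP prefix-function computed in one pass; a border exists iff the final failure value is positive.
import Mathlib
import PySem

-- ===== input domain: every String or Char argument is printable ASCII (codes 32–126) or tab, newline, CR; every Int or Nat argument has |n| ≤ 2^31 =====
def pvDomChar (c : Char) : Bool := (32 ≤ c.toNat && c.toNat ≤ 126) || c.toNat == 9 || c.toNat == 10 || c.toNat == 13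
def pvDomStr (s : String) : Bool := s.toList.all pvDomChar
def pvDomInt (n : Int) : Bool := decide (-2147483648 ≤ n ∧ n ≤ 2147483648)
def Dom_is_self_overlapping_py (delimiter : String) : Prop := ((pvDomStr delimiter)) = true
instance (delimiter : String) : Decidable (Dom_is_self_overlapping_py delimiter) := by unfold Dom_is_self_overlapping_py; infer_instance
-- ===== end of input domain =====

-- B replaces A's quadratic prefix-slice/suffix-slice scan by the one-pass KMP prefix function
-- (a border exists iff the final failure value is positive); objective: faster (asymptotic).


-- ===== PORT A =====
def is_self_overlapping_py (delimiter : String) : Bool :=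
  ((PySem.List.pyRange 1 (PySem.Str.len delimiter) 1).any (fun i =>
    PySem.Str.slice delimiter (some 0) (some i)
      == PySem.Str.slice delimiter (some (PySem.Str.len delimiter - i)) none))

-- ===== PORT B =====
-- B's inner `while k > 0 and delimiter[i] != delimiter[k]: k = pi[k-1]`, with fuel as a
-- termination guard (fuel = k suffices: the failure values strictly decrease).
-- In-range indexing delimiter[j] (always 0 ≤ j < n here) is ported as List.getD.
def pvKmpWhile (l : List Char) (pi : List Nat) (c : Char) : Nat → Nat → Nat
  | 0, k => k
  | fuel + 1, k =>
    if 0 < k ∧ c ≠ l.getD k ' ' then pvKmpWhile l pi c fuel (pi.getD (k - 1) 0) else k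

-- one iteration of B's `for i in range(1, n)` body, state = (pi, k)
def pvKmpStep (l : List Char) (st : List Nat × Nat) (i : Nat) : List Nat × Nat :=
  let c := l.getD i ' '
  let k1 := pvKmpWhile l st.1 c st.2 st.2
  let k2 := if c = l.getD k1 ' ' then k1 + 1 else k1
  (st.1.set i k2, k2)

def is_self_overlapping_py_alt (delimiter : String) : Bool :=
  let l := delimiter.toList
  let r := (List.range' 1 (l.length - 1)).foldl (pvKmpStep l) (List.replicate l.length 0, 0)
  decide (0 < r.2)

-- ===== PRECONDITION & SPEC =====
def Spec_is_self_overlapping_py (delimiter : String) (out : Bool) : Prop := out = is_self_overlapping_py_alt delimiter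
instance (delimiter : String) (out : Bool) : Decidable (Spec_is_self_overlapping_py delimiter out) := by unfold Spec_is_self_overlapping_py; infer_instance

-- ===== CLAIM (what is proved, stated in full; the proofs are below) =====
def Claim_equal_is_self_overlapping_py : Prop := ∀ (delimiter : String), Dom_is_self_overlapping_py delimiter → Spec_is_self_overlapping_py delimiter (is_self_overlapping_py delimiter)

-- ===== LEMMAS AND PROOFS =====

-- k is a (proper) border of y: the length-k prefix equals the length-k suffix
def pvBrd (y : List Char) (k : Nat) : Prop := k < y.length ∧ y.take k = y.drop (y.length - k)

-- length of the longest nonempty proper border (0 if there is none)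
def pvLb (y : List Char) : Nat :=
  Nat.findGreatest (fun k => 0 < k ∧ y.take k = y.drop (y.length - k)) (y.length - 1)

lemma pvBrd_zero {y : List Char} (h : 0 < y.length) : pvBrd y 0 :=
  ⟨h, by simp⟩

lemma le_pvLb {y : List Char} {m : Nat} (hm : pvBrd y m) (h0 : 0 < m) : m ≤ pvLb y :=
  Nat.le_findGreatest (by have := hm.1; omega) ⟨h0, hm.2⟩

lemma pvLb_le {y : List Char} : pvLb y ≤ y.length - 1 :=
  Nat.findGreatest_le _

lemma pvBrd_pvLb {y : List Char} (h : 0 < pvLb y) : pvBrd y (pvLb y) := by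
  have hne : ¬ (Nat.findGreatest (fun k => 0 < k ∧ y.take k = y.drop (y.length - k)) (y.length - 1) = 0) := by
    unfold pvLb at h; omega
  rw [Nat.findGreatest_eq_zero_iff] at hne
  push_neg at hne
  obtain ⟨n, hn0, hnb, hP⟩ := hne
  have hspec := Nat.findGreatest_spec (P := fun k => 0 < k ∧ y.take k = y.drop (y.length - k)) hnb hP
  have hlen : 0 < y.length := by
    rcases Nat.eq_zero_or_pos y.length with h0 | h0
    · omega
    · exact h0
  exact ⟨by have := pvLb_le (y := y); omega, hspec.2⟩

-- a smaller border of y is a border of the (string that is the) larger border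
lemma pvBrd_prefix {y : List Char} {m k : Nat} (hm : pvBrd y m) (hk : pvBrd y k)
    (hmk : m < k) : pvBrd (y.take k) m := by
  have hky := hk.1
  have hlt : (y.take k).length = k := by have := hk.1; simp [List.length_take]; omega
  refine ⟨by omega, ?_⟩
  rw [hlt, List.take_take, min_eq_left hmk.le, hk.2, List.drop_drop,
    show y.length - k + (k - m) = y.length - m from by omega]
  exact hm.2

-- a border of a border of y is a border of y
lemma pvBrd_of_prefix {y : List Char} {m k : Nat} (hk : pvBrd y k)
    (hm : pvBrd (y.take k) m) : pvBrd y m := by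
  have hky := hk.1
  have hlt : (y.take k).length = k := by have := hk.1; simp [List.length_take]; omega
  have hmk : m < k := by have := hm.1; omega
  refine ⟨by omega, ?_⟩
  have h2 := hm.2
  rw [hlt, List.take_take, min_eq_left hmk.le, hk.2, List.drop_drop,
    show y.length - k + (k - m) = y.length - m from by omega] at h2
  exact h2

-- extension: m+1 is a border of l.take (i+1) iff m is a border of l.take i and l[m] = l[i]
lemma pvBrd_extend {l : List Char} {i m : Nat} (h1 : 1 ≤ i) (hi : i < l.length) :
    pvBrd (l.take (i + 1)) (m + 1) ↔ pvBrd (l.take i) m ∧ l.getD m ' ' = l.getD i ' ' := by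
  have hli : (l.take i).length = i := by simp [List.length_take]; omega
  have hli1 : (l.take (i + 1)).length = i + 1 := by simp [List.length_take]; omega
  have htk : l.take (i + 1) = l.take i ++ [l.getD i ' '] := by
    rw [List.take_add_one]
    simp [List.getElem?_eq_getElem hi, List.getD_eq_getElem?_getD]
  constructor
  · rintro ⟨hlen, heq⟩
    rw [hli1] at hlen
    have hmi : m < i := by omega
    have hml : m < l.length := by omega
    have hgm : l[m]?.toList = [l.getD m ' '] := by
      simp [List.getElem?_eq_getElem hml, List.getD_eq_getElem?_getD]
    have hL : (l.take (i + 1)).take (m + 1) = l.take m ++ [l.getD m ' '] := by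
      rw [List.take_take, min_eq_left (by omega : m + 1 ≤ i + 1), List.take_add_one, hgm]
    have hR : (l.take (i + 1)).drop ((l.take (i + 1)).length - (m + 1))
        = (l.take i).drop (i - m) ++ [l.getD i ' '] := by
      rw [hli1, htk, show i + 1 - (m + 1) = i - m from by omega,
        List.drop_append_of_le_length (by omega)]
    rw [hL, hR] at heq
    have hinj := List.append_inj heq (by
      simp [List.length_take, List.length_drop]
      omega)
    refine ⟨⟨by omega, ?_⟩, ?_⟩
    · rw [hli, List.take_take, min_eq_left hmi.le]
      exact hinj.1
    · simpa using hinj.2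
  · rintro ⟨⟨hmlen, hbeq⟩, hchar⟩
    rw [hli] at hmlen
    have hml : m < l.length := by omega
    have hgm : l[m]?.toList = [l.getD m ' '] := by
      simp [List.getElem?_eq_getElem hml, List.getD_eq_getElem?_getD]
    refine ⟨by omega, ?_⟩
    rw [hli1, List.take_take, min_eq_left (by omega : m + 1 ≤ i + 1), List.take_add_one,
      hgm, htk, show i + 1 - (m + 1) = i - m from by omega,
      List.drop_append_of_le_length (by omega)]
    rw [hli, List.take_take, min_eq_left hmlen.le] at hbeq
    rw [hbeq, hchar]

-- correctness of the inner while loop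
lemma pvKmpWhile_spec (l : List Char) (pi : List Nat) (i : Nat) (h1 : 1 ≤ i) (hi : i < l.length)
    (hpi : ∀ j, j < i → pi.getD j 0 = pvLb (l.take (j + 1))) :
    ∀ k, (k = 0 ∨ pvBrd (l.take i) k) → ∀ fuel, k ≤ fuel →
      ((pvKmpWhile l pi (l.getD i ' ') fuel k = 0 ∨
        (pvBrd (l.take i) (pvKmpWhile l pi (l.getD i ' ') fuel k) ∧
         l.getD (pvKmpWhile l pi (l.getD i ' ') fuel k) ' ' = l.getD i ' ')) ∧
       (∀ m, pvBrd (l.take i) m → l.getD m ' ' = l.getD i ' ' → m ≤ k →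
          m ≤ pvKmpWhile l pi (l.getD i ' ') fuel k)) := by
  have hli : (l.take i).length = i := by simp [List.length_take]; omega
  intro k
  induction k using Nat.strong_induction_on with
  | _ k ih =>
    intro hk fuel hfuel
    match fuel with
    | 0 =>
      have hk0 : k = 0 := by omega
      subst hk0
      have h0 : pvKmpWhile l pi (l.getD i ' ') 0 0 = 0 := rfl
      exact ⟨Or.inl h0, fun m _ _ hm => by rw [h0]; exact hm⟩
    | f + 1 =>
      by_cases hc : 0 < k ∧ l.getD i ' ' ≠ l.getD k ' '
      · have hkb : pvBrd (l.take i) k := by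
          rcases hk with rfl | hb
          · omega
          · exact hb
        have hki : k < i := by have := hkb.1; omega
        have hlk : (l.take k).length = k := by simp [List.length_take]; omega
        have hkv : pi.getD (k - 1) 0 = pvLb (l.take k) := by
          have := hpi (k - 1) (by omega)
          rwa [show k - 1 + 1 = k from by omega] at this
        have htt : (l.take i).take k = l.take k := by
          rw [List.take_take, min_eq_left hki.le]
        have hk'lt : pvLb (l.take k) < k := by
          have := pvLb_le (y := l.take k); omega
        have hk'b : pvLb (l.take k) = 0 ∨ pvBrd (l.take i) (pvLb (l.take k)) := by
          rcases Nat.eq_zero_or_pos (pvLb (l.take k)) with h0 | h0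
          · exact Or.inl h0
          · refine Or.inr (pvBrd_of_prefix hkb ?_)
            rw [htt]
            exact pvBrd_pvLb h0
        have hrec := ih (pvLb (l.take k)) (by omega) hk'b f (by omega)
        simp only [pvKmpWhile, if_pos hc]
        rw [hkv]
        refine ⟨hrec.1, ?_⟩
        intro m hm hmc hmk
        have hmne : m ≠ k := by
          intro hemk; subst hemk; exact hc.2 hmc.symm
        have hmlt : m < k := by omega
        rcases Nat.eq_zero_or_pos m with hm0 | hm0
        · omega
        · have hmb' : pvBrd (l.take k) m := by
            have := pvBrd_prefix hm hkb hmlt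
            rwa [htt] at this
          exact hrec.2 m hm hmc (le_pvLb hmb' hm0)
      · simp only [pvKmpWhile, if_neg hc]
        refine ⟨?_, fun m _ _ hm => hm⟩
        rcases hk with rfl | hb
        · exact Or.inl rfl
        · rcases Nat.eq_zero_or_pos k with h0 | h0
          · exact Or.inl h0
          · push_neg at hc
            exact Or.inr ⟨hb, (hc h0).symm⟩

-- correctness of one iteration of the outer loop
lemma pvKmpStep_spec (l : List Char) (pi : List Nat) (k i : Nat) (h1 : 1 ≤ i)
    (hi : i < l.length)
    (hpi : ∀ j, j < i → pi.getD j 0 = pvLb (l.take (j + 1)))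
    (hk : k = pvLb (l.take i)) :
    (pvKmpStep l (pi, k) i).2 = pvLb (l.take (i + 1)) := by
  have hli : (l.take i).length = i := by simp [List.length_take]; omega
  have hli1 : (l.take (i + 1)).length = i + 1 := by simp [List.length_take]; omega
  have hk0 : k = 0 ∨ pvBrd (l.take i) k := by
    rcases Nat.eq_zero_or_pos k with h0 | h0
    · exact Or.inl h0
    · exact Or.inr (hk ▸ pvBrd_pvLb (hk ▸ h0))
  obtain ⟨hr, hcl⟩ := pvKmpWhile_spec l pi i h1 hi hpi k hk0 k le_rfl
  set r := pvKmpWhile l pi (l.getD i ' ') k k with hrdef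
  -- any matching border is ≤ r
  have hclosure : ∀ m, pvBrd (l.take i) m → l.getD m ' ' = l.getD i ' ' → m ≤ r := by
    intro m hm hmc
    rcases Nat.eq_zero_or_pos m with h0 | h0
    · omega
    · exact hcl m hm hmc (hk ▸ le_pvLb hm h0)
  have hrb : pvBrd (l.take i) r := by
    rcases hr with h0 | hb
    · rw [h0]; exact pvBrd_zero (by omega)
    · exact hb.1
  simp only [pvKmpStep, ← hrdef]
  by_cases hif : l.getD i ' ' = l.getD r ' '
  · rw [if_pos hif]
    have hz : pvBrd (l.take (i + 1)) (r + 1) :=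
      (pvBrd_extend h1 hi).mpr ⟨hrb, hif.symm⟩
    apply Nat.le_antisymm
    · -- r + 1 ≤ pvLb (take (i+1))
      exact le_pvLb hz (by omega)
    · -- pvLb (take (i+1)) ≤ r + 1
      by_contra hcon
      push_neg at hcon
      have hpos : 0 < pvLb (l.take (i + 1)) := by omega
      have hb := pvBrd_pvLb hpos
      obtain ⟨m', hm'⟩ : ∃ m', pvLb (l.take (i + 1)) = m' + 1 := ⟨_, (Nat.succ_pred_eq_of_pos hpos).symm⟩
      rw [hm'] at hb
      have := (pvBrd_extend h1 hi).mp hb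
      have := hclosure m' this.1 this.2
      omega
  · rw [if_neg hif]
    have hr0 : r = 0 := by
      rcases hr with h0 | hb
      · exact h0
      · exact absurd hb.2.symm hif
    rw [hr0]
    symm
    rw [show pvLb (l.take (i + 1)) = Nat.findGreatest
        (fun k => 0 < k ∧ (l.take (i + 1)).take k = (l.take (i + 1)).drop ((l.take (i + 1)).length - k))
        ((l.take (i + 1)).length - 1) from rfl]
    rw [Nat.findGreatest_eq_zero_iff]
    intro n hn0 hnb hP
    obtain ⟨m', hm'⟩ : ∃ m', n = m' + 1 := ⟨_, (Nat.succ_pred_eq_of_pos hn0).symm⟩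
    have hbn : pvBrd (l.take (i + 1)) n := ⟨by omega, hP.2⟩
    rw [hm'] at hbn
    have hext := (pvBrd_extend h1 hi).mp hbn
    have hle := hclosure m' hext.1 hext.2
    rw [hr0] at hle
    have hm'0 : m' = 0 := by omega
    rw [hm'0] at hext
    exact hif (hr0 ▸ hext.2.symm)

-- the fold maintains: pi entries ≤ i are the failure values, k is the failure value at i
lemma pvFold_inv (l : List Char) : ∀ i, i + 1 ≤ l.length →
    (((List.range' 1 i).foldl (pvKmpStep l) (List.replicate l.length 0, 0)).1.length = l.length) ∧
    (∀ j, j ≤ i → ((List.range' 1 i).foldl (pvKmpStep l) (List.replicate l.length 0, 0)).1.getD j 0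
        = pvLb (l.take (j + 1))) ∧
    ((List.range' 1 i).foldl (pvKmpStep l) (List.replicate l.length 0, 0)).2 = pvLb (l.take (i + 1)) := by
  intro i
  induction i with
  | zero =>
    intro hlen
    have h1 : (l.take 1).length = 1 := by simp [List.length_take]; omega
    have hlb1 : pvLb (l.take 1) = 0 := by
      unfold pvLb; rw [h1]; simp
    refine ⟨by simp, ?_, by simpa using hlb1.symm⟩
    intro j hj
    interval_cases j
    have hrep : (List.replicate l.length (0:Nat)).getD 0 0 = 0 :=
      List.getD_replicate _ (by omega)
    simp only [List.range'_zero, List.foldl_nil]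
    rw [hrep]
    exact hlb1.symm
  | succ i ihh =>
    intro hlen
    obtain ⟨ihlen, ihpi, ihk⟩ := ihh (by omega)
    set st := (List.range' 1 i).foldl (pvKmpStep l) (List.replicate l.length 0, 0) with hst
    have hconcat : List.range' 1 (i + 1) = List.range' 1 i ++ [i + 1] := by
      rw [List.range'_concat]; simp [Nat.add_comm]
    rw [hconcat, List.foldl_append, List.foldl_cons, List.foldl_nil, ← hst]
    have hstep := pvKmpStep_spec l st.1 st.2 (i + 1) (by omega) (by omega)
      (fun j hj => ihpi j (by omega)) ihk
    have hsteta : pvKmpStep l (st.1, st.2) (i + 1) = pvKmpStep l st (i + 1) := by rfl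
    rw [hsteta] at hstep
    have hfst : (pvKmpStep l st (i + 1)).1 = st.1.set (i + 1) ((pvKmpStep l st (i + 1)).2) := by
      simp only [pvKmpStep]
    refine ⟨by rw [hfst]; simp [ihlen], ?_, hstep⟩
    intro j hj
    rw [hfst]
    rcases Nat.lt_or_ge j (i + 1) with hlt | hge
    · rw [List.getD_eq_getElem?_getD, List.getElem?_set_ne (by omega),
        ← List.getD_eq_getElem?_getD]
      exact ihpi j (by omega)
    · have hjeq : j = i + 1 := by omega
      subst hjeq
      rw [List.getD_eq_getElem?_getD, List.getElem?_set_self (by omega)]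
      simpa using hstep

-- B computes exactly "the longest border is nonempty"
lemma pvAlt_eq (s : String) :
    is_self_overlapping_py_alt s = decide (0 < pvLb s.toList) := by
  show decide (0 < ((List.range' 1 (s.toList.length - 1)).foldl (pvKmpStep s.toList)
      (List.replicate s.toList.length 0, 0)).2) = decide (0 < pvLb s.toList)
  cases hn : s.toList.length with
  | zero =>
    have hnil : s.toList = [] := List.length_eq_zero_iff.mp hn
    simp [hnil, pvLb]
  | succ n =>
    have hfold := (pvFold_inv s.toList n (by omega)).2.2
    rw [hn] at hfold
    simp only [Nat.add_sub_cancel]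
    rw [hfold, show s.toList.take (n + 1) = s.toList from by rw [← hn]; exact List.take_length]

-- A's early-returning slice loop, characterised as border existence
lemma pvA_iff (s : String) :
    is_self_overlapping_py s = true ↔
      ∃ k : Nat, 1 ≤ k ∧ k < s.toList.length ∧
        s.toList.take k = s.toList.drop (s.toList.length - k) := by
  unfold is_self_overlapping_py
  rw [List.any_eq_true]
  constructor
  · rintro ⟨i, hi, hp⟩
    rw [PySem.List.mem_pyRange_one] at hi
    simp only [PySem.Str.len_eq] at hi
    have h0i : 0 ≤ i := by omega
    have hin : i ≤ (s.toList.length : Int) := by omega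
    refine ⟨i.toNat, by omega, by omega, ?_⟩
    have heq : PySem.Str.slice s (some 0) (some i)
        = PySem.Str.slice s (some (PySem.Str.len s - i)) none := beq_iff_eq.mp hp
    have heql : (PySem.Str.slice s (some 0) (some i)).toList
        = (PySem.Str.slice s (some (PySem.Str.len s - i)) none).toList := by rw [heq]
    rw [PySem.Str.toList_slice, PySem.Str.toList_slice,
        PySem.Chars.slice_eq_listSlice, PySem.Chars.slice_eq_listSlice] at heql
    rw [PySem.List.slice_zero_start, PySem.List.slice_to s.toList h0i] at heql
    rw [PySem.List.slice_from _ (by simp only [PySem.Str.len_eq]; omega)] at heql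
    simp only [PySem.Str.len_eq] at heql
    rw [show ((s.toList.length : Int) - i).toNat = s.toList.length - i.toNat from by omega] at heql
    exact heql
  · rintro ⟨k, hk1, hkn, hkeq⟩
    refine ⟨(k : Int), ?_, ?_⟩
    · rw [PySem.List.mem_pyRange_one]
      simp only [PySem.Str.len_eq]
      omega
    · rw [beq_iff_eq]
      apply String.toList_injective
      rw [PySem.Str.toList_slice, PySem.Str.toList_slice,
          PySem.Chars.slice_eq_listSlice, PySem.Chars.slice_eq_listSlice]
      rw [PySem.List.slice_zero_start, PySem.List.slice_to s.toList (by omega : (0:Int) ≤ (k:Int))]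
      rw [PySem.List.slice_from _ (by simp only [PySem.Str.len_eq]; omega)]
      simp only [PySem.Str.len_eq]
      rw [show ((s.toList.length : Int) - (k:Int)).toNat = s.toList.length - k from by omega]
      simpa using hkeq

-- ===== VERDICT =====
theorem is_self_overlapping_py_spec : Claim_equal_is_self_overlapping_py := by
  intro s _
  unfold Spec_is_self_overlapping_py
  rw [pvAlt_eq, Bool.eq_iff_iff, pvA_iff, decide_eq_true_iff]
  constructor
  · rintro ⟨k, hk1, hkn, hkeq⟩
    have := le_pvLb (y := s.toList) (m := k) ⟨hkn, hkeq⟩ (by omega)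
    omega
  · intro h
    have hb := pvBrd_pvLb h
    exact ⟨pvLb s.toList, by omega, hb.1, hb.2⟩
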